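-- pv_equiv track=rewrite | github.com/hwu71/DeepBinDiff | src/visualize_helper.py | find_and_insert_color
-- ===== SOURCE A (Python) =====
-- def find_and_insert_color(lines, node_set, color):
--     color_pattern = '\t\tcolor='+color+',fontcolor='+color+','
--     for block_addr in node_set:
--         for index, line in enumerate(lines):
--             if line.find('<TD >'+hex(block_addr)+'<') != -1:
--                 #line = color_pattern + line
--                 lines.insert(index, color_pattern)
--                 break
--         #lines.insert(index, color_pattern)
--     return lines
-- ===== SOURCE B (Python) =====
-- # B: index lines once by their '<TD >...<' address tokens, tally insertions per
-- # line with a dict, and emit the result in one merge pass (A rescans the whole,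
-- # mutated list for every address).  Like A, it updates `lines` in place
-- # (lines[:] = ...) and returns it.
--
-- def _tokens(line):
--     # all substrings t such that '<TD >' + t + '<' occurs in line (t has no '<'),
--     # scanning left to right and stepping 5 past each '<TD >' marker.
--     res = []
--     i = 0
--     n = len(line)
--     while i < n:
--         if line[i:i + 5] == '<TD >':
--             j = line.find('<', i + 5)
--             if j == -1:
--                 return res
--             res.append(line[i + 5:j])
--             i += 5
--         else:
--             i += 1
--     return res
--
--
-- def find_and_insert_color(lines, node_set, color):
--     color_pattern = '\t\tcolor=' + color + ',fontcolor=' + color + ','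
--     idx = {}
--     for i, line in enumerate(lines):
--         for t in _tokens(line):
--             if t not in idx:
--                 idx[t] = i
--     counts = {}
--     for block_addr in node_set:
--         i = idx.get(hex(block_addr))
--         if i is not None:
--             counts[i] = counts.get(i, 0) + 1
--     out = []
--     for i, line in enumerate(lines):
--         out.extend([color_pattern] * counts.get(i, 0))
--         out.append(line)
--     lines[:] = out
--     return lines
-- ===== Notes on version B (the rewrite author's own statement) =====
-- stated objective: faster
-- what changed: B scans each line once to extract its '<TD >...<' address tokens into a hash index, tallies per-line insertion counts from node_set, and emits the result in a single merge pass, instead of A's per-address rescan of the growing mutated list.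
import Mathlib
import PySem

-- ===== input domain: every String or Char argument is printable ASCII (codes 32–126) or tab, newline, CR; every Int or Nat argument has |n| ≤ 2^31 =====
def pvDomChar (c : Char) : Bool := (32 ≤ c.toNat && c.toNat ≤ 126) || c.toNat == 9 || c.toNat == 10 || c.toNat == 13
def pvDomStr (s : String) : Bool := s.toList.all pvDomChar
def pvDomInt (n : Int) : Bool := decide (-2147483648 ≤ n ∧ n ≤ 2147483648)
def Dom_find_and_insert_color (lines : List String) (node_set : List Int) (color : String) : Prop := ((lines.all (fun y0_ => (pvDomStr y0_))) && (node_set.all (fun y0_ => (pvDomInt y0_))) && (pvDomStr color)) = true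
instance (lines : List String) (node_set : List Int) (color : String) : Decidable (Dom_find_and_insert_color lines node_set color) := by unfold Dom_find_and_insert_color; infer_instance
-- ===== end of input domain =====

-- B replaces A's per-address rescans of the mutated list by a one-pass token
-- index of the lines plus a single merge pass (asymptotically faster by the
-- timing run); like A, the Python B updates `lines` in place and returns it
-- (the equivalence proved here is about the returned value).

-- ===== PORT A =====
-- hex(n): lowercase hex digits of |n|, "0x" prefix, leading '-' for negatives (Python-exact)
def pvHexDigits (n : Nat) : List Char :=
  if h : n < 16 then [Nat.digitChar n]
  else pvHexDigits (n / 16) ++ [Nat.digitChar (n % 16)]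
decreasing_by exact Nat.div_lt_self (by omega) (by omega)

def pvHex (a : Int) : List Char :=
  if a < 0 then '-' :: '0' :: 'x' :: pvHexDigits (-a).toNat
  else '0' :: 'x' :: pvHexDigits a.toNat

-- '\t\tcolor='+color+',fontcolor='+color+','  (built on the char-list side)
def pvPat (color : String) : String :=
  String.ofList ("\t\tcolor=".toList ++ color.toList ++ ",fontcolor=".toList ++ color.toList ++ [','])

-- A's inner 'for index, line in enumerate(lines): if line.find(key) != -1: lines.insert(index, pat); break'
def pvAInner (pat : String) (key : List Char) : List String → List String
  | [] => []
  | l :: rest =>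
    if PySem.Chars.find l.toList key ≠ -1 then pat :: l :: rest
    else l :: pvAInner pat key rest

def find_and_insert_color (lines : List String) (node_set : List Int) (color : String) : List String :=
  node_set.foldl (fun ls a => pvAInner (pvPat color) ("<TD >".toList ++ pvHex a ++ ['<']) ls) lines

-- ===== PORT B =====
-- _tokens(line): all t (no '<') such that '<TD >'+t+'<' occurs, scanning left to right, stepping 5 past each marker
def pvTokens : List Char → List (List Char)
  | [] => []
  | c :: cs =>
    if (c :: cs).take 5 = "<TD >".toList then
      if '<' ∈ cs.drop 4 then (cs.drop 4).takeWhile (· ≠ '<') :: pvTokens (cs.drop 4) else []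
    else pvTokens cs
termination_by s => s.length
decreasing_by
  · simp only [List.length_drop, List.length_cons]; omega
  · simp

def find_and_insert_color_alt (lines : List String) (node_set : List Int) (color : String) : List String :=
  let pat := pvPat color
  let idx : PySem.Dict (List Char) Nat :=
    lines.zipIdx.foldl (fun d li => (pvTokens li.1.toList).foldl (fun d t => d.setdefault t li.2) d) PySem.Dict.empty
  let counts : PySem.Dict Nat Nat :=
    node_set.foldl (fun c a =>
      match idx.get? (pvHex a) with
      | some i => c.insert i (c.getD i 0 + 1)
      | none => c) PySem.Dict.empty
  lines.zipIdx.foldl (fun out li => out ++ List.replicate (counts.getD li.2 0) pat ++ [li.1]) []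

-- ===== PRECONDITION & SPEC =====
-- Pre_ excludes colors whose generated color line itself contains the marker '<TD >': there A's
-- later searches can match color lines A itself inserted earlier — a self-interference corner on
-- which either behaviour is defensible (B consults the original lines only).
def Pre_find_and_insert_color (lines : List String) (node_set : List Int) (color : String) : Prop :=
  PySem.Chars.isIn "<TD >".toList ("\t\tcolor=".toList ++ color.toList ++ ",fontcolor=".toList ++ color.toList ++ [',']) = false
instance (lines : List String) (node_set : List Int) (color : String) : Decidable (Pre_find_and_insert_color lines node_set color) := by unfold Pre_find_and_insert_color; infer_instance

def pvWitness_find_and_insert_color : List String × List Int × String :=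
  (["node: <TD >0x2a<TD", "plain"], [42, -3], "red")

def Spec_find_and_insert_color (lines : List String) (node_set : List Int) (color : String) (out : List String) : Prop := out = find_and_insert_color_alt lines node_set color
instance (lines : List String) (node_set : List Int) (color : String) (out : List String) : Decidable (Spec_find_and_insert_color lines node_set color out) := by unfold Spec_find_and_insert_color; infer_instance

-- ===== CLAIM (what is proved, stated in full; the proofs are below) =====
def Claim_equal_find_and_insert_color : Prop := ∀ (lines : List String) (node_set : List Int) (color : String), Dom_find_and_insert_color lines node_set color → Pre_find_and_insert_color lines node_set color → Spec_find_and_insert_color lines node_set color (find_and_insert_color lines node_set color)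

-- ===== LEMMAS AND PROOFS =====

-- search key of a block address
def pvKey (a : Int) : List Char := "<TD >".toList ++ pvHex a ++ ['<']

-- first ORIGINAL line containing the key
def pvMatchIdx (lines : List String) (key : List Char) : Option Nat :=
  lines.findIdx? (fun l => PySem.Chars.isIn key l.toList)

-- the common normal form: each line preceded by (cnt index) copies of pat
def pvE (pat : String) (lines : List String) (k : Nat) (cnt : Nat → Nat) : List String :=
  (lines.zipIdx k).flatMap (fun li => List.replicate (cnt li.2) pat ++ [li.1])

lemma tdList : "<TD >".toList = ['<', 'T', 'D', ' ', '>'] := by decide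

lemma digitChar_ne_lt (n : Nat) (h : n < 16) : Nat.digitChar n ≠ '<' := by
  interval_cases n <;> decide

lemma pvHexDigits_no_lt (n : Nat) : '<' ∉ pvHexDigits n := by
  induction n using pvHexDigits.induct with
  | case1 n h =>
    rw [pvHexDigits, dif_pos h]
    simp only [List.mem_singleton]
    exact fun hh => digitChar_ne_lt n h hh.symm
  | case2 n h ih =>
    rw [pvHexDigits, dif_neg h]
    simp only [List.mem_append, List.mem_singleton]
    rintro (hm | hm)
    · exact ih hm
    · exact digitChar_ne_lt (n % 16) (Nat.mod_lt _ (by omega)) hm.symm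

lemma pvHex_no_lt (a : Int) : '<' ∉ pvHex a := by
  unfold pvHex
  split
  · intro hm
    simp only [List.mem_cons] at hm
    rcases hm with h | h | h | h
    · exact absurd h (by decide)
    · exact absurd h (by decide)
    · exact absurd h (by decide)
    · exact pvHexDigits_no_lt _ h
  · intro hm
    simp only [List.mem_cons] at hm
    rcases hm with h | h | h
    · exact absurd h (by decide)
    · exact absurd h (by decide)
    · exact pvHexDigits_no_lt _ h

lemma take5_parse {c : Char} {cs : List Char} (h : List.take 5 (c :: cs) = "<TD >".toList) :
    c = '<' ∧ cs.take 4 = ['T', 'D', ' ', '>'] := by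
  rw [tdList] at h
  simp [List.take_succ_cons] at h
  exact ⟨h.1, h.2⟩

lemma key_shift {w cs : List Char} (h4 : cs.take 4 = ['T', 'D', ' ', '>'])
    (h : ('<' :: w) <:+: cs) : ('<' :: w) <:+: cs.drop 4 := by
  obtain ⟨u, v, huv⟩ := h
  by_cases hu : 4 ≤ u.length
  · refine ⟨u.drop 4, v, ?_⟩
    subst huv
    simp [List.drop_append_of_le_length hu]
  · exfalso
    have hu' : u.length < 4 := by omega
    have h1 : cs[u.length]? = some '<' := by
      rw [← huv, List.append_assoc, List.getElem?_append_right (le_refl _), Nat.sub_self]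
      rfl
    have h2 : cs[u.length]? = (cs.take 4)[u.length]? := by
      rw [List.getElem?_take_of_lt hu']
    rw [h4] at h2
    rw [h1] at h2
    have h3 := h2.symm
    interval_cases hn : u.length <;> simp_all

lemma pvTokens_mem_iff (s t : List Char) (ht : '<' ∉ t) :
    t ∈ pvTokens s ↔ ("<TD >".toList ++ t ++ ['<']) <:+: s := by
  induction s using pvTokens.induct with
  | case1 =>
    simp [pvTokens]
  | case2 c cs h5 hlt ih =>
    have hc := (take5_parse h5).1
    have h4 := (take5_parse h5).2
    subst hc
    rw [pvTokens, if_pos h5, if_pos hlt]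
    have hsfx : List.drop 4 cs <:+: ('<' :: cs) :=
      ((List.drop_suffix 4 cs).trans (List.suffix_cons '<' cs)).isInfix
    constructor
    · intro hmem
      rcases List.mem_cons.mp hmem with heq | hmem'
      · -- t is the head token
        subst heq
        set rest := cs.drop 4 with hrest
        have hsplit := List.takeWhile_append_dropWhile (p := (· ≠ '<')) (l := rest)
        have hdw : List.dropWhile (· ≠ '<') rest ≠ [] := by
          intro hnil
          have hmemtw : '<' ∈ List.takeWhile (· ≠ '<') rest := by
            rw [hnil, List.append_nil] at hsplit
            rw [hsplit]; exact hlt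
          have := List.mem_takeWhile_imp hmemtw
          simp at this
        have hhead : (List.dropWhile (· ≠ '<') rest).head hdw = '<' := by
          have := List.head_dropWhile_not (· ≠ '<') hdw
          simpa using this
        have hdw2 : List.dropWhile (· ≠ '<') rest = '<' :: (List.dropWhile (· ≠ '<') rest).tail := by
          conv_lhs => rw [← List.cons_head_tail hdw]
          rw [hhead]
        have hdecomp : rest = List.takeWhile (· ≠ '<') rest ++ '<' :: (List.dropWhile (· ≠ '<') rest).tail := by
          conv_lhs => rw [← hsplit, hdw2]
        refine ⟨[], (List.dropWhile (· ≠ '<') rest).tail, ?_⟩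
        have hs : '<' :: cs = "<TD >".toList ++ rest := by
          rw [tdList]
          have hta : cs = cs.take 4 ++ cs.drop 4 := (List.take_append_drop 4 cs).symm
          rw [hrest]
          conv_lhs => rw [hta, h4]
          simp
        rw [hs]
        conv_rhs => rw [hdecomp]
        simp
      · exact (ih.mp hmem').trans hsfx
    · -- backward
      intro hinf
      rcases List.infix_cons_iff.mp hinf with hpre | hinf'
      · -- key is a prefix of '<' :: cs
        obtain ⟨r, hr⟩ := hpre
        have hrest : cs.drop 4 = t ++ '<' :: r := by
          have hd := congrArg (List.drop 5) hr
          rw [tdList] at hd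
          simpa using hd.symm
        have htok : List.takeWhile (· ≠ '<') (cs.drop 4) = t := by
          rw [hrest, List.takeWhile_append]
          have hself : List.takeWhile (fun x => decide (x ≠ '<')) t = t :=
            List.takeWhile_eq_self_iff.mpr (by
              intro x hx
              simp only [ne_eq, decide_eq_true_eq]
              intro h; exact ht (h ▸ hx))
          rw [hself]
          simp
        rw [List.mem_cons]
        exact Or.inl htok.symm
      · -- key occurs inside cs
        have hkey : ("<TD >".toList ++ t ++ ['<']) <:+: cs.drop 4 := by
          rw [tdList] at hinf' ⊢
          exact key_shift h4 hinf'
        exact List.mem_cons.mpr (Or.inr (ih.mpr hkey))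
  | case3 c cs h5 hlt =>
    have hc := (take5_parse h5).1
    have h4 := (take5_parse h5).2
    subst hc
    rw [pvTokens, if_pos h5, if_neg hlt]
    simp only [List.not_mem_nil, false_iff]
    intro hinf
    apply hlt
    rcases List.infix_cons_iff.mp hinf with hpre | hinf'
    · obtain ⟨r, hr⟩ := hpre
      have hrest : cs.drop 4 = t ++ '<' :: r := by
        have hd := congrArg (List.drop 5) hr
        rw [tdList] at hd
        simpa using hd.symm
      rw [hrest]
      simp
    · have hkey : ("<TD >".toList ++ t ++ ['<']) <:+: cs.drop 4 := by
        rw [tdList] at hinf' ⊢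
        exact key_shift h4 hinf'
      exact List.IsInfix.mem (by simp) hkey
  | case4 c cs h5 ih =>
    rw [pvTokens, if_neg h5]
    rw [ih]
    constructor
    · intro h; exact h.trans (List.suffix_cons c cs).isInfix
    · intro hinf
      rcases List.infix_cons_iff.mp hinf with hpre | hinf'
      · exfalso
        apply h5
        obtain ⟨r, hr⟩ := hpre
        rw [← hr]
        rw [List.append_assoc, List.append_assoc]
        rw [List.take_append_of_le_length (by rw [tdList]; simp)]
        simp [tdList]
      · exact hinf'

-- under Pre_, the colour pattern never contains a key
lemma pat_no_key (color : String)
    (hpre : PySem.Chars.isIn "<TD >".toList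
      ("\t\tcolor=".toList ++ color.toList ++ ",fontcolor=".toList ++ color.toList ++ [',']) = false)
    (a : Int) : ¬ pvKey a <:+: (pvPat color).toList := by
  intro h
  rw [pvPat, String.toList_ofList] at h
  have hm : "<TD >".toList <+: pvKey a := by
    rw [pvKey, List.append_assoc]; exact List.prefix_append _ _
  exact (PySem.Chars.isIn_eq_false_iff _ _).mp hpre (hm.isInfix.trans h)

lemma pvE_cons (pat : String) (l : String) (ls : List String) (k : Nat) (cnt : Nat → Nat) :
    pvE pat (l :: ls) k cnt = List.replicate (cnt k) pat ++ l :: pvE pat ls (k + 1) cnt := by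
  simp [pvE, List.zipIdx_cons]

lemma pvE_congr (pat : String) (lines : List String) : ∀ (k : Nat) (f g : Nat → Nat),
    (∀ i, k ≤ i → f i = g i) → pvE pat lines k f = pvE pat lines k g := by
  induction lines with
  | nil => intro k f g _; rfl
  | cons l ls ih =>
    intro k f g h
    rw [pvE_cons, pvE_cons, h k (le_refl k), ih (k + 1) f g (fun i hi => h i (by omega))]

lemma pvE_zero (pat : String) (lines : List String) : pvE pat lines 0 (fun _ => 0) = lines := by
  have h : ∀ (ls : List String) (k : Nat), pvE pat ls k (fun _ => 0) = ls := by
    intro ls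
    induction ls with
    | nil => intro k; rfl
    | cons l ls ih => intro k; rw [pvE_cons, ih (k + 1)]; simp
  exact h lines 0

lemma pvAInner_append (pat : String) (key : List Char) (xs ys : List String)
    (hxs : ∀ x ∈ xs, ¬ key <:+: x.toList) :
    pvAInner pat key (xs ++ ys) = xs ++ pvAInner pat key ys := by
  induction xs with
  | nil => simp
  | cons x xs ih =>
    rw [List.cons_append, pvAInner,
      if_neg (fun hc => hxs x (List.mem_cons_self) ((PySem.Chars.find_ne_neg_one_iff _ _).mp hc)),
      ih (fun x hx => hxs x (List.mem_cons_of_mem _ hx)), List.cons_append]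

lemma pvAInner_pvE (pat : String) (key : List Char) (hpat : ¬ key <:+: pat.toList)
    (lines : List String) : ∀ (k : Nat) (cnt : Nat → Nat),
    pvAInner pat key (pvE pat lines k cnt)
      = pvE pat lines k
          (fun i => cnt i + if (pvMatchIdx lines key).map (· + k) = some i then 1 else 0) := by
  induction lines with
  | nil => intro k cnt; simp [pvE, pvAInner, pvMatchIdx]
  | cons l ls ih =>
    intro k cnt
    rw [pvE_cons,
      pvAInner_append pat key _ _
        (fun x hx => by rw [List.eq_of_mem_replicate hx]; exact hpat)]
    by_cases hm : key <:+: l.toList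
    · rw [pvAInner, if_pos ((PySem.Chars.find_ne_neg_one_iff _ _).mpr hm)]
      have hidx : pvMatchIdx (l :: ls) key = some 0 := by
        simp [pvMatchIdx, List.findIdx?_cons, (PySem.Chars.isIn_iff_infix key l.toList).mpr hm]
      rw [hidx, pvE_cons]
      simp only [Option.map_some, Nat.zero_add, eq_self_iff_true, if_true]
      rw [List.replicate_succ', List.append_assoc, List.singleton_append]
      congr 3
      exact pvE_congr pat ls (k + 1) _ _ (fun i hi => by
        rw [if_neg (by intro hcon; simp at hcon; omega), Nat.add_zero])
    · rw [pvAInner,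
        if_neg (fun hc => hm ((PySem.Chars.find_ne_neg_one_iff _ _).mp hc)),
        ih (k + 1) cnt]
      have hidx : pvMatchIdx (l :: ls) key = (pvMatchIdx ls key).map (· + 1) := by
        simp [pvMatchIdx, List.findIdx?_cons, (PySem.Chars.isIn_eq_false_iff key l.toList).mpr hm]
      rw [pvE_cons, hidx]
      have hk : cnt k + (if ((pvMatchIdx ls key).map (· + 1)).map (· + k) = some k then 1 else 0)
          = cnt k := by
        cases hmi : pvMatchIdx ls key <;> simp [hmi]
      rw [hk]
      congr 2
      exact pvE_congr pat ls (k + 1) _ _ (fun i hi => by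
        cases hmi : pvMatchIdx ls key <;> simp [hmi, Nat.add_assoc, Nat.add_comm 1 k])

lemma foldA (pat : String) (lines : List String) (ns : List Int)
    (hpat : ∀ a : Int, ¬ pvKey a <:+: pat.toList) : ∀ (cnt : Nat → Nat),
    ns.foldl (fun ls a => pvAInner pat (pvKey a) ls) (pvE pat lines 0 cnt)
      = pvE pat lines 0
          (fun i => cnt i + ns.countP (fun a => pvMatchIdx lines (pvKey a) = some i)) := by
  induction ns with
  | nil =>
    intro cnt
    rw [List.foldl_nil]
    exact pvE_congr pat lines 0 _ _ (fun i _ => by simp)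
  | cons a ns ih =>
    intro cnt
    rw [List.foldl_cons, pvAInner_pvE pat (pvKey a) (hpat a) lines 0 cnt]
    have hmap : (pvMatchIdx lines (pvKey a)).map (· + 0) = pvMatchIdx lines (pvKey a) := by
      cases pvMatchIdx lines (pvKey a) <;> simp
    rw [hmap, ih]
    exact pvE_congr pat lines 0 _ _ (fun i _ => by
      rw [List.countP_cons]
      by_cases hp : pvMatchIdx lines (pvKey a) = some i <;> simp [hp] <;> omega)

-- B-side: lookup through the setdefault fold over one line's tokens
lemma get_fold_setdefault (ts : List (List Char)) (i : Nat) :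
    ∀ (d : PySem.Dict (List Char) Nat) (t : List Char),
    ((ts.foldl (fun d t => d.setdefault t i) d).get? t)
      = match d.get? t with
        | some v => some v
        | none => if t ∈ ts then some i else none := by
  induction ts with
  | nil => intro d t; cases hdt : d.get? t <;> simp [hdt]
  | cons t' ts ih =>
    intro d t
    rw [List.foldl_cons, ih]
    have hstep : (d.setdefault t' i).get? t
        = match d.get? t with
          | some v => some v
          | none => if t = t' then some i else none := by
      by_cases hc : d.contains t'
      · rw [PySem.Dict.setdefault_of_contains d i hc]
        cases hdt : d.get? t with
        | some v => rfl
        | none =>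
          by_cases ht' : t = t'
          · subst ht'
            rw [(PySem.Dict.get?_eq_none_iff_contains d t).mp hdt] at hc
            simp at hc
          · simp [ht']
      · rw [PySem.Dict.setdefault_of_not_contains d i (by simpa using hc),
          PySem.Dict.get?_insert]
        by_cases ht' : t = t'
        · subst ht'
          simp [(PySem.Dict.get?_eq_none_iff_contains d t).mpr (by simpa using hc)]
        · cases hdt : d.get? t <;> simp [ht']
    rw [hstep]
    cases hdt : d.get? t with
    | some v => rfl
    | none =>
      by_cases ht' : t = t'
      · simp [ht']
      · simp [ht', List.mem_cons]

-- B-side: lookup through the whole index-building fold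
lemma get_fold_build (ps : List (String × Nat)) :
    ∀ (d : PySem.Dict (List Char) Nat) (t : List Char),
    ((ps.foldl (fun d li => (pvTokens li.1.toList).foldl (fun d t => d.setdefault t li.2) d) d).get? t)
      = match d.get? t with
        | some v => some v
        | none => (ps.find? (fun li => decide (t ∈ pvTokens li.1.toList))).map (·.2) := by
  induction ps with
  | nil => intro d t; cases hdt : d.get? t <;> simp [hdt]
  | cons p ps ih =>
    intro d t
    rw [List.foldl_cons, ih, get_fold_setdefault]
    cases hdt : d.get? t with
    | some v => rfl
    | none =>
      by_cases hp : t ∈ pvTokens p.1.toList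
      · simp [hp, List.find?_cons_of_pos]
      · simp [hp, List.find?_cons_of_neg]

-- bridge from find? on zipIdx to findIdx?
lemma find_zipIdx (ls : List String) (p : String → Bool) : ∀ (k : Nat),
    ((ls.zipIdx k).find? (fun li => p li.1)).map (·.2) = (ls.findIdx? p).map (· + k) := by
  induction ls with
  | nil => intro k; rfl
  | cons l ls ih =>
    intro k
    rw [List.zipIdx_cons, List.findIdx?_cons]
    by_cases hp : p l
    · rw [List.find?_cons_of_pos (by simpa using hp), if_pos hp]
      simp
    · rw [List.find?_cons_of_neg (by simpa using hp), if_neg hp, ih (k + 1)]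
      cases ls.findIdx? p <;> simp <;> omega

-- counts lookup
lemma counts_getD (idx : PySem.Dict (List Char) Nat) (ns : List Int) (i : Nat) :
    ∀ (c : PySem.Dict Nat Nat),
    ((ns.foldl (fun c a =>
        match idx.get? (pvHex a) with
        | some j => c.insert j (c.getD j 0 + 1)
        | none => c) c).getD i 0)
      = c.getD i 0 + ns.countP (fun a => idx.get? (pvHex a) = some i) := by
  induction ns with
  | nil => intro c; simp
  | cons a ns ih =>
    intro c
    rw [List.foldl_cons]
    cases hg : idx.get? (pvHex a) with
    | none =>
      simp only [hg]
      rw [ih, List.countP_cons]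
      simp [hg]
    | some j =>
      simp only [hg]
      rw [ih, PySem.Dict.getD_insert, List.countP_cons]
      simp only [hg, Option.some.injEq, decide_eq_true_eq]
      by_cases hij : i = j
      · subst hij; simp; omega
      · rw [if_neg hij, if_neg (fun h => hij h.symm)]; omega

-- the two match predicates agree
lemma pred_eq (a : Int) :
    (fun l : String => decide (pvHex a ∈ pvTokens l.toList))
      = (fun l : String => PySem.Chars.isIn (pvKey a) l.toList) := by
  funext l
  by_cases h : pvKey a <:+: l.toList
  · rw [decide_eq_true ((pvTokens_mem_iff l.toList (pvHex a) (pvHex_no_lt a)).mpr h),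
      (PySem.Chars.isIn_iff_infix _ _).mpr h]
  · rw [decide_eq_false (fun hm => h ((pvTokens_mem_iff l.toList (pvHex a) (pvHex_no_lt a)).mp hm)),
      (PySem.Chars.isIn_eq_false_iff _ _).mpr h]

-- ===== VERDICT (by name: the statement is the Claim_ definition above) =====
theorem find_and_insert_color_spec : Claim_equal_find_and_insert_color := by
  intro lines ns color _hdom hpre
  unfold Pre_find_and_insert_color at hpre
  unfold Spec_find_and_insert_color
  unfold find_and_insert_color find_and_insert_color_alt
  simp only []
  -- A side
  have hpat : ∀ a : Int, ¬ pvKey a <:+: (pvPat color).toList := pat_no_key color hpre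
  have hA : ns.foldl (fun ls a => pvAInner (pvPat color) ("<TD >".toList ++ pvHex a ++ ['<']) ls) lines
      = pvE (pvPat color) lines 0
          (fun i => ns.countP (fun a => pvMatchIdx lines (pvKey a) = some i)) := by
    conv_lhs => rw [← pvE_zero (pvPat color) lines]
    rw [show (fun ls a => pvAInner (pvPat color) ("<TD >".toList ++ pvHex a ++ ['<']) ls)
        = (fun ls a => pvAInner (pvPat color) (pvKey a) ls) from rfl]
    rw [foldA (pvPat color) lines ns hpat (fun _ => 0)]
    exact pvE_congr _ lines 0 _ _ (fun i _ => by simp)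
  rw [hA]
  -- B side
  rw [show (fun (out : List String) (li : String × Nat) =>
        out ++
          List.replicate
            ((List.foldl (fun c a =>
                match ((lines.zipIdx.foldl
                    (fun d li => (pvTokens li.1.toList).foldl (fun d t => d.setdefault t li.2) d)
                    PySem.Dict.empty).get? (pvHex a)) with
                | some j => c.insert j (c.getD j 0 + 1)
                | none => c) PySem.Dict.empty ns).getD li.2 0) (pvPat color) ++ [li.1])
      = (fun (out : List String) (li : String × Nat) =>
        out ++
          (List.replicate
            ((List.foldl (fun c a =>
                match ((lines.zipIdx.foldl
                    (fun d li => (pvTokens li.1.toList).foldl (fun d t => d.setdefault t li.2) d)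
                    PySem.Dict.empty).get? (pvHex a)) with
                | some j => c.insert j (c.getD j 0 + 1)
                | none => c) PySem.Dict.empty ns).getD li.2 0) (pvPat color) ++ [li.1]))
      from funext fun out => funext fun li => List.append_assoc _ _ _]
  rw [PySem.List.foldl_append_eq_flatMap, List.nil_append]
  have hgoal : pvE (pvPat color) lines 0
      (fun i => ns.countP (fun a => pvMatchIdx lines (pvKey a) = some i))
      = pvE (pvPat color) lines 0
          (fun i =>
            ((ns.foldl (fun c a =>
              match ((lines.zipIdx.foldl
                  (fun d li => (pvTokens li.1.toList).foldl (fun d t => d.setdefault t li.2) d)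
                  PySem.Dict.empty).get? (pvHex a)) with
              | some j => c.insert j (c.getD j 0 + 1)
              | none => c) PySem.Dict.empty).getD i 0)) := by
    apply pvE_congr
    intro i _
    rw [counts_getD]
    have hidx : ∀ a : Int,
        ((lines.zipIdx.foldl
            (fun d li => (pvTokens li.1.toList).foldl (fun d t => d.setdefault t li.2) d)
            PySem.Dict.empty).get? (pvHex a)) = pvMatchIdx lines (pvKey a) := by
      intro a
      rw [get_fold_build]
      have hempty : (PySem.Dict.empty : PySem.Dict (List Char) Nat).get? (pvHex a) = none := rfl
      rw [hempty]
      simp only []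
      rw [find_zipIdx lines (fun l => decide (pvHex a ∈ pvTokens l.toList)) 0]
      rw [pred_eq a]
      have : (lines.findIdx? fun l => PySem.Chars.isIn (pvKey a) l.toList)
          = pvMatchIdx lines (pvKey a) := rfl
      rw [this]
      cases pvMatchIdx lines (pvKey a) <;> simp
    simp only [hidx]
    rw [show (PySem.Dict.empty : PySem.Dict Nat Nat).getD i 0 = 0 from rfl, Nat.zero_add]
  rw [hgoal]
  rfl
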